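-- pv_equiv track=rewrite | github.com/vaphio/raspiApli | tm1630/test5dig.py | getNumList
-- ===== SOURCE A (Python) =====
-- def getNumList(num, base):
--     dig = []
--     buf = num
--     for i in range(4):
--         bnum = base ** (3 - i)
--         dig.append(buf // bnum)
--         buf = buf % bnum
--     return dig
-- ===== SOURCE B (Python) =====
-- def getNumList(num, base):
--     # closed form: no loop, no running-remainder state
--     q3 = num // base ** 3
--     m2 = num % base ** 2
--     return [q3, num // base ** 2 - base * q3, m2 // base, m2 % base]
-- ===== Notes on version B (the rewrite author's own statement) =====
-- stated objective: simpler
-- what changed: Replaces the 4-iteration power-and-subtract loop with running remainder state by a loop-free closed form: each of the four list entries is computed directly from num via one floor-division/mod by base**3, base**2 or base.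
import Mathlib
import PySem

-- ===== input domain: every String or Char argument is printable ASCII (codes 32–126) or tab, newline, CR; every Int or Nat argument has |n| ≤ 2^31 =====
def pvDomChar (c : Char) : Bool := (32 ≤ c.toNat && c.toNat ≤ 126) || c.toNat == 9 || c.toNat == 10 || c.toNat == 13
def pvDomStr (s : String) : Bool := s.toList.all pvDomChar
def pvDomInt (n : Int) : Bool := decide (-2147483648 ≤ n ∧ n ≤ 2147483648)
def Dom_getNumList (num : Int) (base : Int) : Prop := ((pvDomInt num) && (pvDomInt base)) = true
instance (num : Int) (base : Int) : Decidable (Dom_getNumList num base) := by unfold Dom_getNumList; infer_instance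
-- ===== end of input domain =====

-- B replaces A's power-and-subtract loop (with a running remainder) by a loop-free
-- closed form computing each digit directly from num; simpler, same cost.

-- ===== PORT A =====
def getNumList (num : Int) (base : Int) : List Int :=
  -- dig = []; buf = num; for i in range(4): bnum = base**(3-i); dig.append(buf//bnum); buf = buf % bnum
  (((PySem.List.pyRange 0 4 1).foldl
      (fun (s : List Int × Int) (i : Int) =>
        let bnum := base ^ (3 - i).toNat
        (s.1 ++ [PySem.Int.floordiv s.2 bnum], PySem.Int.mod s.2 bnum))
      ([], num))).1

-- ===== PORT B =====
def getNumList_alt (num : Int) (base : Int) : List Int :=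
  let q3 := PySem.Int.floordiv num (base ^ 3)
  let m2 := PySem.Int.mod num (base ^ 2)
  [q3, PySem.Int.floordiv num (base ^ 2) - base * q3,
   PySem.Int.floordiv m2 base, PySem.Int.mod m2 base]

-- ===== PRECONDITION & SPEC =====
-- A raises ZeroDivisionError when base = 0 (base**3 = 0 in the first iteration); B raises there too.
def Pre_getNumList (num : Int) (base : Int) : Prop := base ≠ 0
instance (num : Int) (base : Int) : Decidable (Pre_getNumList num base) := by unfold Pre_getNumList; infer_instance
def pvWitness_getNumList : Int × Int := (259, 4)
def Spec_getNumList (num : Int) (base : Int) (out : List Int) : Prop := out = getNumList_alt num base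
instance (num : Int) (base : Int) (out : List Int) : Decidable (Spec_getNumList num base out) := by unfold Spec_getNumList; infer_instance

-- ===== CLAIM (what is proved, stated in full; the proofs are below) =====
def Claim_equal_getNumList : Prop := ∀ (num : Int) (base : Int), Dom_getNumList num base → Pre_getNumList num base → Spec_getNumList num base (getNumList num base)

-- ===== LEMMAS AND PROOFS =====

-- (a + c*b).fmod b = a.fmod b, for b ≠ 0
theorem pv_add_mul_fmod (a b c : Int) (hb : b ≠ 0) : (a + c * b).fmod b = a.fmod b := by
  rw [Int.fmod_def, Int.fmod_def, Int.add_mul_fdiv_right a c hb]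
  ring

-- collapsing a mod by b*b after a mod by b*b*b
theorem pv_fmod_cube_sq (n b : Int) (hb : b ≠ 0) :
    (n.fmod (b * b * b)).fmod (b * b) = n.fmod (b * b) := by
  have hbb : b * b ≠ 0 := mul_ne_zero hb hb
  have h : n.fmod (b * b * b) = n + (-(b * n.fdiv (b * b * b))) * (b * b) := by
    rw [Int.fmod_def]; ring
  rw [h, pv_add_mul_fmod _ _ _ hbb]

-- second digit: (n mod b^3) // b^2 = n // b^2 - b * (n // b^3)
theorem pv_digit2 (n b : Int) (hb : b ≠ 0) :
    (n.fmod (b * b * b)).fdiv (b * b) = n.fdiv (b * b) - b * n.fdiv (b * b * b) := by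
  have hbb : b * b ≠ 0 := mul_ne_zero hb hb
  have h : n.fmod (b * b * b) = n + (-(b * n.fdiv (b * b * b))) * (b * b) := by
    rw [Int.fmod_def]; ring
  rw [h, Int.add_mul_fdiv_right _ _ hbb]
  ring

-- ===== VERDICT (by name: the statement is the Claim_ definition above) =====
theorem getNumList_spec : Claim_equal_getNumList := by
  intro num base _ hb
  show getNumList num base = getNumList_alt num base
  have hr : PySem.List.pyRange 0 4 1 = [0, 1, 2, 3] := by decide
  simp only [getNumList, getNumList_alt, hr, List.foldl, PySem.Int.floordiv, PySem.Int.mod]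
  have e3 : ((3:Int) - 0).toNat = 3 := rfl
  have e2 : ((3:Int) - 1).toNat = 2 := rfl
  have e1 : ((3:Int) - 2).toNat = 1 := rfl
  have e0 : ((3:Int) - 3).toNat = 0 := rfl
  have h3' : base ^ (3:Nat) = base * base * base := by ring
  have h2' : base ^ (2:Nat) = base * base := by ring
  simp only [e0, e1, e2, e3, pow_zero, pow_one, h2', h3', Int.fdiv_one,
    List.nil_append, List.cons_append]
  rw [pv_fmod_cube_sq num base hb, pv_digit2 num base hb]
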